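-- pv_equiv track=rewrite | github.com/dewsl/dewsl_loggers | gateway3/toolbox.py | findItemInConfig
-- ===== SOURCE A (Python) =====
-- def findItemInConfig(configlist):
--     i=0
--     iName, iSimnet, iSimnum = None, None, None
--     for line in configlist:
--         if line.startswith('name'):
--             iName = i
--         elif line.startswith('simnet'):
--             iSimnet = i
--         elif line.startswith('simnum'):
--             iSimnum = i
--         i += 1
--     return iName, iSimnet, iSimnum
-- ===== SOURCE B (Python) =====
-- def findItemInConfig(configlist):
--     def last(prefix):
--         for j, line in enumerate(reversed(configlist)):
--             if line.startswith(prefix):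
--                 return len(configlist) - 1 - j
--         return None
--     return last('name'), last('simnet'), last('simnum')
-- ===== Notes on version B (the rewrite author's own statement) =====
-- stated objective: alternative
-- what changed: Replaces the single forward pass with a mutable counter and an if/elif cascade by three independent backward scans, each returning the first hit from the end (= last occurrence) of its own prefix.
import Mathlib
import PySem

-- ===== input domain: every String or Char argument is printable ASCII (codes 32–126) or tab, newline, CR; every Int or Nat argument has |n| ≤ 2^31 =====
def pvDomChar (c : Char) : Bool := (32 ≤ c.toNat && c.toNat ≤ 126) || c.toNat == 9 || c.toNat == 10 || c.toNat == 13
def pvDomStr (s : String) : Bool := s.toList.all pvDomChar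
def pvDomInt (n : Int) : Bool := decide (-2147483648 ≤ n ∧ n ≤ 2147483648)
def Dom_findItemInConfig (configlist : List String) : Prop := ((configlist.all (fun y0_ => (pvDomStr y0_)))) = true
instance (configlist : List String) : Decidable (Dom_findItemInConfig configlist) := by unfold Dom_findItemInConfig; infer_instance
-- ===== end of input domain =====

-- B replaces A's single forward pass (counter + if/elif cascade) by three independent
-- backward scans, one per prefix; alternative decomposition, same O(n) cost.

-- ===== PORT A =====
-- one loop step of A's for-loop: state (i, iName, iSimnet, iSimnum)
def pvStep (st : Int × Option Int × Option Int × Option Int) (line : String) :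
    Int × Option Int × Option Int × Option Int :=
  match st with
  | (i, iName, iSimnet, iSimnum) =>
    if PySem.Str.startswith line "name" then (i + 1, some i, iSimnet, iSimnum)
    else if PySem.Str.startswith line "simnet" then (i + 1, iName, some i, iSimnum)
    else if PySem.Str.startswith line "simnum" then (i + 1, iName, iSimnet, some i)
    else (i + 1, iName, iSimnet, iSimnum)

def findItemInConfig (configlist : List String) : Option Int × Option Int × Option Int :=
  let s := configlist.foldl pvStep (0, none, none, none)
  (s.2.1, s.2.2.1, s.2.2.2)

-- ===== PORT B =====
-- B's inner loop: scan the reversed list, return the offset j of the first hit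
def pvRevFind (p : String) : List String → Option Nat
  | [] => none
  | line :: rest =>
    if PySem.Str.startswith line p then some 0
    else (pvRevFind p rest).map (· + 1)

-- B's helper last(prefix): len(configlist) - 1 - j for the first hit in reversed(configlist)
def pvLast (configlist : List String) (p : String) : Option Int :=
  (pvRevFind p configlist.reverse).map (fun (j : Nat) => (configlist.length : Int) - 1 - (j : Int))

def findItemInConfig_alt (configlist : List String) : Option Int × Option Int × Option Int :=
  (pvLast configlist "name", pvLast configlist "simnet", pvLast configlist "simnum")

-- ===== PRECONDITION & SPEC =====
def Spec_findItemInConfig (configlist : List String) (out : Option Int × Option Int × Option Int) : Prop := out = findItemInConfig_alt configlist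
instance (configlist : List String) (out : Option Int × Option Int × Option Int) : Decidable (Spec_findItemInConfig configlist out) := by unfold Spec_findItemInConfig; infer_instance

-- ===== CLAIM (what is proved, stated in full; the proofs are below) =====
def Claim_equal_findItemInConfig : Prop := ∀ (configlist : List String), Dom_findItemInConfig configlist → Spec_findItemInConfig configlist (findItemInConfig configlist)

-- ===== LEMMAS AND PROOFS =====

-- the three prefixes are pairwise incompatible, so A's elif cascade behaves as independent ifs
lemma pv_sw_excl {p q : List Char} (l : List Char) (hne : ¬ p <+: q ∧ ¬ q <+: p)
    (h : PySem.Chars.startswith l p = true) : PySem.Chars.startswith l q = false := by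
  by_contra hq
  rw [Bool.not_eq_false] at hq
  rw [PySem.Chars.startswith_iff] at h hq
  rcases List.prefix_or_prefix_of_prefix h hq with hpq | hqp
  · exact hne.1 hpq
  · exact hne.2 hqp

lemma pv_name_simnet (l : List Char) (h : PySem.Chars.startswith l "name".toList = true) :
    PySem.Chars.startswith l "simnet".toList = false :=
  pv_sw_excl l (by decide) h

lemma pv_name_simnum (l : List Char) (h : PySem.Chars.startswith l "name".toList = true) :
    PySem.Chars.startswith l "simnum".toList = false :=
  pv_sw_excl l (by decide) h

lemma pv_simnet_simnum (l : List Char) (h : PySem.Chars.startswith l "simnet".toList = true) :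
    PySem.Chars.startswith l "simnum".toList = false :=
  pv_sw_excl l (by decide) h

-- appending one line to the config updates B's per-prefix last index in the obvious way
lemma pvLast_snoc (xs : List String) (x : String) (p : String) :
    pvLast (xs ++ [x]) p =
      if PySem.Str.startswith x p then some (xs.length : Int) else pvLast xs p := by
  unfold pvLast
  rw [List.reverse_append]
  simp only [List.reverse_singleton, List.singleton_append, pvRevFind]
  split_ifs with h
  · simp
  · cases hr : pvRevFind p xs.reverse with
    | none => simp
    | some j =>
      simp only [Option.map_some]
      congr 1
      push_cast [List.length_append, List.length_singleton]
      ring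

-- A's fold state after xs equals (length, B's three last indices)
lemma pv_main (xs : List String) :
    xs.foldl pvStep (0, none, none, none) =
      ((xs.length : Int), pvLast xs "name", pvLast xs "simnet", pvLast xs "simnum") := by
  induction xs using List.reverseRecOn with
  | nil => simp [pvLast, pvRevFind]
  | append_singleton xs x ih =>
    rw [List.foldl_append, ih]
    have hcast : (((xs ++ [x]).length : Nat) : Int) = (xs.length : Int) + 1 := by
      simp
    simp only [List.foldl_cons, List.foldl_nil, pvStep, pvLast_snoc, hcast,
      PySem.Str.startswith_eq]
    by_cases h1 : PySem.Chars.startswith x.toList "name".toList = true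
    · have e2 := pv_name_simnet x.toList h1
      have e3 := pv_name_simnum x.toList h1
      rw [if_pos h1, if_pos h1, if_neg (by rw [e2]; simp), if_neg (by rw [e3]; simp)]
    · by_cases h2 : PySem.Chars.startswith x.toList "simnet".toList = true
      · have e3 := pv_simnet_simnum x.toList h2
        rw [if_neg h1, if_neg h1, if_pos h2, if_pos h2, if_neg (by rw [e3]; simp)]
      · by_cases h3 : PySem.Chars.startswith x.toList "simnum".toList = true
        · rw [if_neg h1, if_neg h1, if_neg h2, if_neg h2, if_pos h3, if_pos h3]
        · rw [if_neg h1, if_neg h1, if_neg h2, if_neg h2, if_neg h3, if_neg h3]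

-- ===== VERDICT (by name: the statement is the Claim_ definition above) =====
theorem findItemInConfig_spec : Claim_equal_findItemInConfig := by
  intro configlist _
  unfold Spec_findItemInConfig findItemInConfig findItemInConfig_alt
  rw [pv_main]
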